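-- pv_equiv track=rewrite | github.com/bengalack/msx_models_db | scraper/slotmap.py | _pages_for_mem
-- ===== SOURCE A (Python) =====
-- _PAGE_SIZE = 0x4000
--
-- def _pages_for_mem(base: int, size: int) -> list[int]:
--     """Return the list of 4KB pages (0-3) whose range intersects [base, base+size)."""
--     pages = []
--     for p in range(4):
--         page_start = p * _PAGE_SIZE
--         page_end = page_start + _PAGE_SIZE
--         mem_end = base + size
--         if page_start < mem_end and page_end > base:
--             pages.append(p)
--     return pages
-- ===== SOURCE B (Python) =====
-- _PAGE_SIZE = 0x4000
--
-- def _pages_for_mem(base: int, size: int) -> list[int]: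
--     """Closed-form: pages intersecting [base, base+size) form a contiguous run."""
--     lo = max(base // _PAGE_SIZE, 0)
--     hi = min((base + size - 1) // _PAGE_SIZE, 3)
--     return list(range(lo, hi + 1))
-- ===== Notes on version B (the rewrite author's own statement) =====
-- stated objective: simpler
-- what changed: Replace the per-page scan-and-test loop with a closed-form computation: derive the first and last intersecting page by floor division, clamp to 0..3, and return the contiguous range.
import Mathlib
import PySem

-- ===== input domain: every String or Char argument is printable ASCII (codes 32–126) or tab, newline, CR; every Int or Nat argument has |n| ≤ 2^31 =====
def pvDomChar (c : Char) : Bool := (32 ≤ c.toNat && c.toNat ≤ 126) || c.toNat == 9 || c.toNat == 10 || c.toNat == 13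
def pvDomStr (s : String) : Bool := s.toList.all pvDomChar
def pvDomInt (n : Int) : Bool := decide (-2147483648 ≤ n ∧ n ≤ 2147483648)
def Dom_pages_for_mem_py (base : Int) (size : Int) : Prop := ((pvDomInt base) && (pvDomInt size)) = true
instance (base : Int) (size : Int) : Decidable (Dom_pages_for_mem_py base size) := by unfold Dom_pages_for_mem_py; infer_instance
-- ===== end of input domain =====

-- B replaces A's per-page scan with a closed-form clamped page range (simpler, same result).


-- ===== PORT A =====
def pages_for_mem_py (base : Int) (size : Int) : List Int :=
  (PySem.List.pyRange 0 4 1).foldl (fun pages p =>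
    let page_start := p * 16384
    let page_end := page_start + 16384
    let mem_end := base + size
    if page_start < mem_end ∧ page_end > base then pages ++ [p] else pages) []

-- ===== PORT B =====
def pages_for_mem_py_alt (base : Int) (size : Int) : List Int :=
  let lo := max (PySem.Int.floordiv base 16384) 0
  let hi := min (PySem.Int.floordiv (base + size - 1) 16384) 3
  PySem.List.pyRange lo (hi + 1) 1

-- ===== PRECONDITION & SPEC =====
def Spec_pages_for_mem_py (base : Int) (size : Int) (out : List Int) : Prop := out = pages_for_mem_py_alt base size
instance (base : Int) (size : Int) (out : List Int) : Decidable (Spec_pages_for_mem_py base size out) := by unfold Spec_pages_for_mem_py; infer_instance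

-- ===== CLAIM (what is proved, stated in full; the proofs are below) =====
def Claim_equal_pages_for_mem_py : Prop := ∀ (base : Int) (size : Int), Dom_pages_for_mem_py base size → Spec_pages_for_mem_py base size (pages_for_mem_py base size)

-- ===== LEMMAS AND PROOFS =====

lemma interval_filter (L H : Int) (hL : 0 ≤ L) (hH : H ≤ 3) :
    PySem.List.pyRange L (H + 1) 1
      = List.filter (fun p => decide (L ≤ p ∧ p ≤ H)) [0, 1, 2, 3] := by
  by_cases h : L ≤ H
  · have hL3 : L ≤ 3 := le_trans h hH
    interval_cases L <;> interval_cases H <;> decide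
  · rw [PySem.List.pyRange_one_eq_nil (by omega)]
    symm
    rw [List.filter_eq_nil_iff]
    intro p hp
    simp only [decide_eq_true_eq, not_and, not_le]
    omega

-- ===== VERDICT (by name: the statement is the Claim_ definition above) =====
theorem pages_for_mem_py_spec : Claim_equal_pages_for_mem_py := by
  unfold Claim_equal_pages_for_mem_py Spec_pages_for_mem_py
  intro base size _
  unfold pages_for_mem_py pages_for_mem_py_alt
  simp only []
  set q1 := PySem.Int.floordiv base 16384 with hq1
  set q2 := PySem.Int.floordiv (base + size - 1) 16384 with hq2
  have hb1 : q1 * 16384 ≤ base :=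
    (PySem.Int.le_floordiv_iff_mul_le (by omega)).mp le_rfl
  have hb2 : base < (q1 + 1) * 16384 :=
    (PySem.Int.floordiv_lt_iff_lt_mul (by omega)).mp (by omega)
  have hc1 : q2 * 16384 ≤ base + size - 1 :=
    (PySem.Int.le_floordiv_iff_mul_le (by omega)).mp le_rfl
  have hc2 : base + size - 1 < (q2 + 1) * 16384 :=
    (PySem.Int.floordiv_lt_iff_lt_mul (by omega)).mp (by omega)
  have hfold : PySem.List.pyRange 0 4 1 = [0, 1, 2, 3] := by decide
  rw [hfold, PySem.List.foldl_append_ite_eq_filter, List.nil_append,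
      interval_filter (max q1 0) (min q2 3) (by omega) (by omega)]
  apply List.filter_congr
  intro p hp
  have hp' : p = 0 ∨ p = 1 ∨ p = 2 ∨ p = 3 := by simpa using hp
  simp only [decide_eq_decide, gt_iff_lt]
  omega
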